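-- pv_equiv track=rewrite | github.com/kseenyoung/programmers | school/1-1 방울.py | solution
-- ===== SOURCE A (Python) =====
-- from itertools import accumulate
--
-- def solution(bell):
--     start = {}
--     end = {}
--
--     for i, x in enumerate(accumulate([0] + [1 if bell[a] == 2 else -1 for a in range(len(bell))])):
--         if x not in start:
--             start[x] = i
--         end[x] = i
--
--     return max(end[x] - start[x] for x in end)
-- ===== SOURCE B (Python) =====
-- def solution(bell):
--     # Sort-then-scan: sort (index, prefix value) pairs by value; equal prefix
--     # values become contiguous runs, and the answer is the largest index spread
--     # (max index - min index) seen within any single run.  No dictionaries.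
--     prefs = [0]
--     s = 0
--     for x in bell:
--         s += 1 if x == 2 else -1
--         prefs.append(s)
--     order = sorted(enumerate(prefs), key=lambda p: p[1])
--     best = 0
--     lo, hi, prev = order[0][0], order[0][0], order[0][1]
--     for idx, v in order[1:]:
--         if v != prev:
--             best = max(best, hi - lo)
--             lo, hi, prev = idx, idx, v
--         else:
--             lo, hi = min(lo, idx), max(hi, idx)
--     return max(best, hi - lo)
-- ===== Notes on version B (the rewrite author's own statement) =====
-- stated objective: alternative
-- what changed: B replaces A's hash-based pass (two dicts of first/last occurrence per prefix value plus a final max scan over the dict) by sort-then-scan: it sorts the (index, prefix value) pairs by value so equal prefix values become contiguous runs, then one scan takes the largest max-minus-min index spread within a run.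
import Mathlib
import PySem

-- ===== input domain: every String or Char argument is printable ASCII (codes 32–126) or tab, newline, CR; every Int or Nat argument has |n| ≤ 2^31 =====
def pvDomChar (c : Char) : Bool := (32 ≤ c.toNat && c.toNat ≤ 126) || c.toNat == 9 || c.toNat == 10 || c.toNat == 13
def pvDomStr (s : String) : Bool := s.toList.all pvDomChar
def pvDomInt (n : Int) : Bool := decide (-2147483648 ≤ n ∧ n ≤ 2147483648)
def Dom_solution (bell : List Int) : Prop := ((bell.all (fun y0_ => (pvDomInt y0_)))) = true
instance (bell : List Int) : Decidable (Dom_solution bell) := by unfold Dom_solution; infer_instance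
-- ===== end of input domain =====

-- B replaces A's dict pass (first/last occurrence per prefix value, then a max scan over the
-- dict) by sort-then-scan: sort the (index, prefix value) pairs by value and take the largest
-- max-minus-min index spread within a run of equal values (objective: alternative).

-- ===== PORT A =====
-- itertools.accumulate with running sum s (accumulate(l) = pyAccumulate l 0)
def pyAccumulate : List Int → Int → List Int
  | [], _ => []
  | h :: t, s => (s + h) :: pyAccumulate t (s + h)

def solution (bell : List Int) : Int :=
  -- bell[a] with a ∈ range(len(bell)) is always in range, so pyGetD is exact here
  let prefs := pyAccumulate ((0 : Int) ::
      (PySem.List.pyRange 0 (bell.length : Int) 1).map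
        (fun a => if PySem.List.pyGetD bell a 0 = 2 then (1 : Int) else -1)) 0
  let sd := (PySem.List.enumerate prefs 0).foldl
      (fun (st : PySem.Dict Int Int × PySem.Dict Int Int) p =>
        ((if st.1.contains p.2 then st.1 else st.1.insert p.2 p.1),
         st.2.insert p.2 p.1))
      (PySem.Dict.empty, PySem.Dict.empty)
  -- max(end[x] - start[x] for x in end); end always holds the index-0 prefix, the [] branch is unreachable
  match PySem.Dict.keys sd.2 with
  | [] => 0
  | k :: ks => ks.foldl (fun m x => max m (sd.2.getD x 0 - sd.1.getD x 0))
      (sd.2.getD k 0 - sd.1.getD k 0)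

-- ===== PORT B =====
def solution_alt (bell : List Int) : Int :=
  let prefs := (bell.foldl (fun (st : List Int × Int) x =>
      let s := st.2 + (if x = 2 then (1 : Int) else -1)
      (st.1 ++ [s], s)) ([(0 : Int)], 0)).1
  let order := PySem.List.sorted (PySem.List.enumerate prefs 0) (fun p => p.2) false
  -- order[0] always exists (prefs starts with the index-0 prefix); order[1:] is the tail
  match order with
  | [] => 0
  | h :: t =>
    let st := t.foldl (fun (st : Int × Int × Int × Int) p =>  -- (best, lo, hi, prev)
        if p.2 ≠ st.2.2.2 then (max st.1 (st.2.2.1 - st.2.1), p.1, p.1, p.2)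
        else (st.1, min st.2.1 p.1, max st.2.2.1 p.1, st.2.2.2))
      (0, h.1, h.1, h.2)
    max st.1 (st.2.2.1 - st.2.1)

-- ===== PRECONDITION & SPEC =====
def Spec_solution (bell : List Int) (out : Int) : Prop := out = solution_alt bell
instance (bell : List Int) (out : Int) : Decidable (Spec_solution bell out) := by unfold Spec_solution; infer_instance

-- ===== CLAIM (what is proved, stated in full; the proofs are below) =====
def Claim_equal_solution : Prop := ∀ (bell : List Int), Dom_solution bell → Spec_solution bell (solution bell)

-- ===== LEMMAS AND PROOFS =====

-- Python max/min of a (possibly empty) int list, seeded fold form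
def pvListMax : List Int → Int
  | [] => 0
  | h :: t => t.foldl max h

def pvListMin : List Int → Int
  | [] => 0
  | h :: t => t.foldl min h

-- indices carrying value v, and their extremes
def pvIdxs (l : List (Int × Int)) (v : Int) : List Int :=
  (l.filter (fun p => p.2 = v)).map (fun p => p.1)

def pvLo (l : List (Int × Int)) (v : Int) : Int := pvListMin (pvIdxs l v)
def pvHi (l : List (Int × Int)) (v : Int) : Int := pvListMax (pvIdxs l v)
def pvDiff (l : List (Int × Int)) (v : Int) : Int := pvHi l v - pvLo l v

-- the common characterisation both programs are proved to satisfy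
def pvIsAns (l : List (Int × Int)) (r : Int) : Prop :=
  0 ≤ r ∧ (r = 0 ∨ ∃ v ∈ l.map (fun p => p.2), r = pvDiff l v) ∧
  ∀ v ∈ l.map (fun p => p.2), pvDiff l v ≤ r

theorem pvListMax_mem {l : List Int} (h : l ≠ []) : pvListMax l ∈ l := by
  cases l with
  | nil => exact absurd rfl h
  | cons a t =>
    rcases PySem.List.foldl_max_mem t a with h2 | h2 <;> simp [pvListMax, h2]

theorem pvListMax_ub {l : List Int} : ∀ y ∈ l, y ≤ pvListMax l := by
  cases l with
  | nil => intro y hy; cases hy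
  | cons a t =>
    intro y hy
    have h1 := PySem.List.le_foldl_max t a
    rcases List.mem_cons.mp hy with rfl | hyt
    · simpa [pvListMax] using h1.1
    · simpa [pvListMax] using h1.2 y hyt

theorem pvListMax_eq_of {l : List Int} {m : Int} (hm : m ∈ l) (hub : ∀ y ∈ l, y ≤ m) :
    pvListMax l = m := by
  exact le_antisymm (hub _ (pvListMax_mem (List.ne_nil_of_mem hm))) (pvListMax_ub m hm)

theorem pvListMin_mem {l : List Int} (h : l ≠ []) : pvListMin l ∈ l := by
  cases l with
  | nil => exact absurd rfl h
  | cons a t =>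
    rcases PySem.List.foldl_min_mem t a with h2 | h2 <;> simp [pvListMin, h2]

theorem pvListMin_lb {l : List Int} : ∀ y ∈ l, pvListMin l ≤ y := by
  cases l with
  | nil => intro y hy; cases hy
  | cons a t =>
    intro y hy
    have h1 := PySem.List.foldl_min_le t a
    rcases List.mem_cons.mp hy with rfl | hyt
    · simpa [pvListMin] using h1.1
    · simpa [pvListMin] using h1.2 y hyt

theorem pvListMin_eq_of {l : List Int} {m : Int} (hm : m ∈ l) (hlb : ∀ y ∈ l, m ≤ y) :
    pvListMin l = m := by
  exact le_antisymm (pvListMin_lb m hm) (hlb _ (pvListMin_mem (List.ne_nil_of_mem hm)))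

theorem pvIdxs_mem {l : List (Int × Int)} {p : Int × Int} (hp : p ∈ l) :
    p.1 ∈ pvIdxs l p.2 := by
  simp only [pvIdxs, List.mem_map, List.mem_filter]
  exact ⟨p, ⟨hp, by simp⟩, rfl⟩

theorem pvDiff_nonneg {l : List (Int × Int)} {v : Int} (h : v ∈ l.map (fun p => p.2)) :
    0 ≤ pvDiff l v := by
  simp only [List.mem_map] at h
  obtain ⟨p, hp, rfl⟩ := h
  have hmem := pvIdxs_mem hp
  have h1 := pvListMin_lb _ hmem
  have h2 := pvListMax_ub _ hmem
  unfold pvDiff pvLo pvHi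
  omega

theorem pvIsAns_le {l : List (Int × Int)} {r1 r2 : Int}
    (h1 : pvIsAns l r1) (h2 : pvIsAns l r2) : r1 ≤ r2 := by
  rcases h1.2.1 with rfl | ⟨v, hv, rfl⟩
  · exact h2.1
  · exact h2.2.2 v hv

theorem pvIsAns_unique {l : List (Int × Int)} {r1 r2 : Int}
    (h1 : pvIsAns l r1) (h2 : pvIsAns l r2) : r1 = r2 :=
  le_antisymm (pvIsAns_le h1 h2) (pvIsAns_le h2 h1)

theorem pvIdxs_perm {l l' : List (Int × Int)} {v : Int} (h : l.Perm l') :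
    (pvIdxs l v).Perm (pvIdxs l' v) :=
  (h.filter _).map _

theorem pvListMax_perm {l l' : List Int} (h : l.Perm l') : pvListMax l = pvListMax l' := by
  rcases eq_or_ne l [] with rfl | hne
  · rw [h.symm.eq_nil]
  · exact (pvListMax_eq_of (h.mem_iff.mp (pvListMax_mem hne))
      (fun y hy => pvListMax_ub y (h.mem_iff.mpr hy))).symm

theorem pvListMin_perm {l l' : List Int} (h : l.Perm l') : pvListMin l = pvListMin l' := by
  rcases eq_or_ne l [] with rfl | hne
  · rw [h.symm.eq_nil]
  · exact (pvListMin_eq_of (h.mem_iff.mp (pvListMin_mem hne))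
      (fun y hy => pvListMin_lb y (h.mem_iff.mpr hy))).symm

theorem pvDiff_perm {l l' : List (Int × Int)} {v : Int} (h : l.Perm l') :
    pvDiff l v = pvDiff l' v := by
  unfold pvDiff pvHi pvLo
  rw [pvListMax_perm (pvIdxs_perm h), pvListMin_perm (pvIdxs_perm h)]

theorem pvIsAns_perm {l l' : List (Int × Int)} {r : Int} (h : l.Perm l')
    (ha : pvIsAns l r) : pvIsAns l' r := by
  obtain ⟨h0, hex, hub⟩ := ha
  refine ⟨h0, ?_, ?_⟩
  · rcases hex with rfl | ⟨v, hv, rfl⟩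
    · exact Or.inl rfl
    · exact Or.inr ⟨v, (h.map _).mem_iff.mp hv, pvDiff_perm h⟩
  · intro v hv
    rw [← pvDiff_perm h]
    exact hub v ((h.map _).mem_iff.mpr hv)

-- find? is the head of the filtered list
theorem pvFind?_eq_head?_filter (p : (Int × Int) → Bool) (l : List (Int × Int)) :
    l.find? p = (l.filter p).head? := by
  induction l with
  | nil => rfl
  | cons a t ih =>
    cases hpa : p a
    · rw [List.find?_cons_of_neg (by simp [hpa]), List.filter_cons_of_neg (by simp [hpa])]
      exact ih
    · rw [List.find?_cons_of_pos hpa, List.filter_cons_of_pos hpa]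
      rfl

-- on a list with strictly increasing indices, the first pair with value v carries the min index
theorem pvFirst_eq_lo {ps : List (Int × Int)} {v : Int}
    (hps : ps.Pairwise (fun p q => p.1 < q.1)) (hv : v ∈ ps.map (fun p => p.2)) :
    ((ps.find? (fun q => q.2 = v)).map (fun q => q.1)).getD 0 = pvLo ps v := by
  rw [pvFind?_eq_head?_filter]
  have hfp : (ps.filter (fun q => decide (q.2 = v))).Pairwise (fun p q => p.1 < q.1) :=
    hps.filter _
  have hfne : ps.filter (fun q => decide (q.2 = v)) ≠ [] := by
    simp only [List.mem_map] at hv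
    obtain ⟨p, hp, rfl⟩ := hv
    exact List.ne_nil_of_mem (List.mem_filter.mpr ⟨hp, by simp⟩)
  cases hfl : ps.filter (fun q => decide (q.2 = v)) with
  | nil => exact absurd hfl hfne
  | cons a t =>
    rw [hfl] at hfp
    have hub := (List.pairwise_cons.mp hfp).1
    simp only [List.head?_cons, Option.map_some, Option.getD_some]
    symm
    unfold pvLo pvIdxs
    rw [hfl]
    apply pvListMin_eq_of
    · simp
    · intro y hy
      simp only [List.map_cons, List.mem_cons, List.mem_map] at hy
      rcases hy with rfl | ⟨q, hq, rfl⟩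
      · exact le_refl _
      · exact le_of_lt (hub q hq)

-- … and the last such pair carries the max index
theorem pvLast_eq_hi {ps : List (Int × Int)} {v : Int} {d : Int}
    (hps : ps.Pairwise (fun p q => p.1 < q.1)) (hv : v ∈ ps.map (fun p => p.2)) :
    ((ps.reverse.find? (fun q => q.2 = v)).map (fun q => q.1)).getD d = pvHi ps v := by
  rw [pvFind?_eq_head?_filter, List.filter_reverse, List.head?_reverse]
  have hfp : (ps.filter (fun q => decide (q.2 = v))).Pairwise (fun p q => p.1 < q.1) :=
    hps.filter _
  have hfne : ps.filter (fun q => decide (q.2 = v)) ≠ [] := by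
    simp only [List.mem_map] at hv
    obtain ⟨p, hp, rfl⟩ := hv
    exact List.ne_nil_of_mem (List.mem_filter.mpr ⟨hp, by simp⟩)
  rcases (ps.filter (fun q => decide (q.2 = v))).eq_nil_or_concat with hfl | ⟨t, a, hfl⟩
  · exact absurd hfl hfne
  · rw [hfl] at hfp ⊢
    simp only [List.concat_eq_append] at hfp ⊢
    have hub : ∀ q ∈ t, q.1 < a.1 := by
      intro q hq
      exact (List.pairwise_append.mp hfp).2.2 q hq a (by simp)
    rw [List.getLast?_append_cons]
    simp only [List.getLast?_singleton, Option.map_some, Option.getD_some]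
    symm
    unfold pvHi pvIdxs
    rw [hfl]
    simp only [List.concat_eq_append]
    apply pvListMax_eq_of
    · simp
    · intro y hy
      simp only [List.map_append, List.mem_append, List.map_cons, List.map_nil,
        List.mem_singleton, List.mem_map] at hy
      rcases hy with ⟨q, hq, rfl⟩ | rfl
      · exact le_of_lt (hub q hq)
      · exact le_refl _

-- characterisation of A's two-dict fold
theorem pvAfold (ps : List (Int × Int)) : ∀ (s e : PySem.Dict Int Int),
    s.keys = e.keys →
    (∀ v, v ∈ (ps.foldl
        (fun (st : PySem.Dict Int Int × PySem.Dict Int Int) p =>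
          ((if st.1.contains p.2 then st.1 else st.1.insert p.2 p.1),
           st.2.insert p.2 p.1)) (s, e)).2.keys ↔ v ∈ e.keys ∨ v ∈ ps.map (fun p => p.2)) ∧
    (∀ v ∈ e.keys, (ps.foldl
        (fun (st : PySem.Dict Int Int × PySem.Dict Int Int) p =>
          ((if st.1.contains p.2 then st.1 else st.1.insert p.2 p.1),
           st.2.insert p.2 p.1)) (s, e)).1.getD v 0 = s.getD v 0) ∧
    (∀ v, v ∉ e.keys → (ps.foldl
        (fun (st : PySem.Dict Int Int × PySem.Dict Int Int) p =>
          ((if st.1.contains p.2 then st.1 else st.1.insert p.2 p.1),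
           st.2.insert p.2 p.1)) (s, e)).1.getD v 0
        = ((ps.find? (fun q => q.2 = v)).map (fun q => q.1)).getD 0) ∧
    (∀ v, (ps.foldl
        (fun (st : PySem.Dict Int Int × PySem.Dict Int Int) p =>
          ((if st.1.contains p.2 then st.1 else st.1.insert p.2 p.1),
           st.2.insert p.2 p.1)) (s, e)).2.getD v 0
        = ((ps.reverse.find? (fun q => q.2 = v)).map (fun q => q.1)).getD (e.getD v 0)) := by
  induction ps with
  | nil =>
    intro s e hse
    refine ⟨by simp, by simp, ?_, by simp⟩
    intro v hv
    have hvc : s.contains v = false := by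
      rw [Bool.eq_false_iff]
      intro h
      exact hv (hse ▸ (PySem.Dict.contains_iff_mem_keys s v).mp h)
    simp [PySem.Dict.getD_of_not_contains _ _ hvc]
  | cons p t ih =>
    intro s e hse
    simp only [List.foldl_cons]
    have hce : e.contains p.2 = s.contains p.2 := by
      simp [PySem.Dict.contains_eq_decide_mem_keys, hse]
    by_cases hc : s.contains p.2 = true
    · -- key already present in both dicts
      have hpe : p.2 ∈ e.keys := by
        rw [← hse]; exact (PySem.Dict.contains_iff_mem_keys s p.2).mp hc
      have hkeys : (e.insert p.2 p.1).keys = e.keys :=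
        PySem.Dict.keys_insert_of_contains e p.1 (by rw [hce]; exact hc)
      obtain ⟨ih1, ih2, ih3, ih4⟩ := ih s (e.insert p.2 p.1) (by rw [hse, hkeys])
      simp only [hc, if_true]
      refine ⟨?_, ?_, ?_, ?_⟩
      · intro v
        rw [ih1 v, hkeys]
        simp only [List.map_cons, List.mem_cons]
        constructor
        · tauto
        · rintro (hv | rfl | hv) <;> tauto
      · intro v hv
        exact ih2 v (by rw [hkeys]; exact hv)
      · intro v hv
        have hvne : p.2 ≠ v := fun h => hv (h ▸ hpe)
        rw [ih3 v (by rw [hkeys]; exact hv)]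
        simp [hvne]
      · intro v
        rw [ih4 v]
        simp only [List.reverse_cons]
        rw [List.find?_append]
        cases hf : t.reverse.find? (fun q => decide (q.2 = v)) with
        | some q => simp
        | none =>
          simp only [Option.none_or]
          rw [PySem.Dict.getD_insert]
          by_cases hv : v = p.2
          · subst hv; simp
          · have : p.2 ≠ v := fun h => hv h.symm
            simp [this, hv]
    · -- fresh key: appended to both dicts
      have hpe : p.2 ∉ e.keys := by
        rw [← hse]
        intro hmem
        exact hc ((PySem.Dict.contains_iff_mem_keys s p.2).mpr hmem)
      have hcf : s.contains p.2 = false := by simpa using hc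
      have hkeys : (e.insert p.2 p.1).keys = e.keys ++ [p.2] :=
        PySem.Dict.keys_insert_of_not_contains e p.1 (by rw [hce]; exact hcf)
      have hkeys' : (s.insert p.2 p.1).keys = s.keys ++ [p.2] :=
        PySem.Dict.keys_insert_of_not_contains s p.1 hcf
      obtain ⟨ih1, ih2, ih3, ih4⟩ := ih (s.insert p.2 p.1) (e.insert p.2 p.1)
        (by rw [hkeys, hkeys', hse])
      simp only [hc, if_false, Bool.false_eq_true]
      refine ⟨?_, ?_, ?_, ?_⟩
      · intro v
        rw [ih1 v, hkeys]
        simp only [List.map_cons, List.mem_cons, List.mem_append,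
          List.not_mem_nil, or_false]
        tauto
      · intro v hv
        have hvne : v ≠ p.2 := fun h => hpe (h ▸ hv)
        rw [ih2 v (by rw [hkeys]; exact List.mem_append_left _ hv)]
        rw [PySem.Dict.getD_insert]
        simp [hvne]
      · intro v hv
        by_cases hv2 : v = p.2
        · subst hv2
          rw [ih2 p.2 (by rw [hkeys]; exact List.mem_append_right _ (by simp))]
          rw [PySem.Dict.getD_insert]
          simp
        · have : p.2 ≠ v := fun h => hv2 h.symm
          rw [ih3 v (by rw [hkeys]; simp [hv, Ne.symm this])]
          simp [this]
      · intro v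
        rw [ih4 v]
        simp only [List.reverse_cons]
        rw [List.find?_append]
        cases hf : t.reverse.find? (fun q => decide (q.2 = v)) with
        | some q => simp
        | none =>
          simp only [Option.none_or]
          rw [PySem.Dict.getD_insert]
          by_cases hv : v = p.2
          · subst hv; simp
          · have : p.2 ≠ v := fun h => hv h.symm
            simp [this, hv]

-- A's final generator max as pvListMax over the mapped keys
theorem pvScan (f : Int → Int) (k : Int) (ks : List Int) :
    ks.foldl (fun m x => max m (f x)) (f k) = pvListMax ((k :: ks).map f) := by
  simp [pvListMax, List.foldl_map]

-- A's core satisfies the characterisation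
theorem pvIsAns_A {ps : List (Int × Int)} (hne : ps ≠ [])
    (hps : ps.Pairwise (fun p q => p.1 < q.1)) :
    pvIsAns ps
      (match PySem.Dict.keys (ps.foldl
          (fun (st : PySem.Dict Int Int × PySem.Dict Int Int) p =>
            ((if st.1.contains p.2 then st.1 else st.1.insert p.2 p.1),
             st.2.insert p.2 p.1)) (PySem.Dict.empty, PySem.Dict.empty)).2 with
       | [] => 0
       | k :: ks => ks.foldl (fun m x => max m ((ps.foldl
          (fun (st : PySem.Dict Int Int × PySem.Dict Int Int) p =>
            ((if st.1.contains p.2 then st.1 else st.1.insert p.2 p.1),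
             st.2.insert p.2 p.1)) (PySem.Dict.empty, PySem.Dict.empty)).2.getD x 0
            - (ps.foldl
          (fun (st : PySem.Dict Int Int × PySem.Dict Int Int) p =>
            ((if st.1.contains p.2 then st.1 else st.1.insert p.2 p.1),
             st.2.insert p.2 p.1)) (PySem.Dict.empty, PySem.Dict.empty)).1.getD x 0))
          ((ps.foldl
          (fun (st : PySem.Dict Int Int × PySem.Dict Int Int) p =>
            ((if st.1.contains p.2 then st.1 else st.1.insert p.2 p.1),
             st.2.insert p.2 p.1)) (PySem.Dict.empty, PySem.Dict.empty)).2.getD k 0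
            - (ps.foldl
          (fun (st : PySem.Dict Int Int × PySem.Dict Int Int) p =>
            ((if st.1.contains p.2 then st.1 else st.1.insert p.2 p.1),
             st.2.insert p.2 p.1)) (PySem.Dict.empty, PySem.Dict.empty)).1.getD k 0)) := by
  obtain ⟨h1, h2, h3, h4⟩ := pvAfold ps PySem.Dict.empty PySem.Dict.empty rfl
  set F := ps.foldl
      (fun (st : PySem.Dict Int Int × PySem.Dict Int Int) p =>
        ((if st.1.contains p.2 then st.1 else st.1.insert p.2 p.1),
         st.2.insert p.2 p.1)) (PySem.Dict.empty, PySem.Dict.empty) with hF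
  have hkv : ∀ x, x ∈ PySem.Dict.keys F.2 ↔ x ∈ ps.map (fun p => p.2) := by
    intro x
    simpa [PySem.Dict.keys_empty] using h1 x
  have hdval : ∀ x ∈ ps.map (fun p => p.2),
      F.2.getD x 0 - F.1.getD x 0 = pvDiff ps x := by
    intro x hx
    rw [h3 x (by simp [PySem.Dict.keys_empty]), h4 x,
      pvFirst_eq_lo hps hx, pvLast_eq_hi hps hx]
    rfl
  cases hk : PySem.Dict.keys F.2 with
  | nil =>
    exfalso
    cases ps with
    | nil => exact hne rfl
    | cons q ts =>
      have := (hkv q.2).mpr (by simp)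
      rw [hk] at this
      exact absurd this (List.not_mem_nil)
  | cons k ks =>
    show pvIsAns ps
      (ks.foldl (fun m x => max m (F.2.getD x 0 - F.1.getD x 0)) (F.2.getD k 0 - F.1.getD k 0))
    rw [pvScan (fun x => F.2.getD x 0 - F.1.getD x 0) k ks]
    have hkk : ∀ x, x ∈ k :: ks ↔ x ∈ ps.map (fun p => p.2) := by
      intro x; rw [← hk]; exact hkv x
    have hLne : (k :: ks).map (fun x => F.2.getD x 0 - F.1.getD x 0) ≠ [] := by simp
    have hmax := pvListMax_mem hLne
    rw [List.mem_map] at hmax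
    obtain ⟨x₀, hx₀, hx₀eq⟩ := hmax
    have hx₀v : x₀ ∈ ps.map (fun p => p.2) := (hkk x₀).mp hx₀
    refine ⟨?_, Or.inr ⟨x₀, hx₀v, ?_⟩, ?_⟩
    · rw [← hx₀eq, hdval x₀ hx₀v]
      exact pvDiff_nonneg hx₀v
    · rw [← hx₀eq, hdval x₀ hx₀v]
    · intro v hv
      rw [← hdval v hv]
      exact pvListMax_ub _ (List.mem_map.mpr ⟨v, (hkk v).mpr hv, rfl⟩)

theorem pvIdxs_append_pos {l : List (Int × Int)} {p : Int × Int} {v : Int} (h : p.2 = v) :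
    pvIdxs (l ++ [p]) v = pvIdxs l v ++ [p.1] := by
  simp [pvIdxs, List.filter_append, h]

theorem pvIdxs_append_neg {l : List (Int × Int)} {p : Int × Int} {v : Int} (h : p.2 ≠ v) :
    pvIdxs (l ++ [p]) v = pvIdxs l v := by
  simp [pvIdxs, List.filter_append, h]

theorem pvDiff_append_neg {l : List (Int × Int)} {p : Int × Int} {v : Int} (h : p.2 ≠ v) :
    pvDiff (l ++ [p]) v = pvDiff l v := by
  unfold pvDiff pvHi pvLo
  rw [pvIdxs_append_neg h]

theorem pvIdxs_ne_nil {l : List (Int × Int)} {v : Int} (h : v ∈ l.map (fun p => p.2)) :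
    pvIdxs l v ≠ [] := by
  simp only [List.mem_map] at h
  obtain ⟨p, hp, rfl⟩ := h
  exact List.ne_nil_of_mem (pvIdxs_mem hp)

theorem pvIdxs_eq_nil {l : List (Int × Int)} {v : Int} (h : v ∉ l.map (fun p => p.2)) :
    pvIdxs l v = [] := by
  unfold pvIdxs
  rw [List.map_eq_nil_iff, List.filter_eq_nil_iff]
  intro p hp
  simp only [decide_eq_true_eq]
  intro hpv
  exact h (List.mem_map.mpr ⟨p, hp, hpv⟩)

theorem pvListMin_append {xs : List Int} {a : Int} (h : xs ≠ []) :
    pvListMin (xs ++ [a]) = min (pvListMin xs) a := by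
  cases xs with
  | nil => exact absurd rfl h
  | cons b t => simp [pvListMin, List.foldl_append]

theorem pvListMax_append {xs : List Int} {a : Int} (h : xs ≠ []) :
    pvListMax (xs ++ [a]) = max (pvListMax xs) a := by
  cases xs with
  | nil => exact absurd rfl h
  | cons b t => simp [pvListMax, List.foldl_append]

theorem pvLo_append_pos {l : List (Int × Int)} {p : Int × Int} {v : Int}
    (hmem : v ∈ l.map (fun q => q.2)) (h : p.2 = v) :
    pvLo (l ++ [p]) v = min (pvLo l v) p.1 := by
  unfold pvLo
  rw [pvIdxs_append_pos h, pvListMin_append (pvIdxs_ne_nil hmem)]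

theorem pvHi_append_pos {l : List (Int × Int)} {p : Int × Int} {v : Int}
    (hmem : v ∈ l.map (fun q => q.2)) (h : p.2 = v) :
    pvHi (l ++ [p]) v = max (pvHi l v) p.1 := by
  unfold pvHi
  rw [pvIdxs_append_pos h, pvListMax_append (pvIdxs_ne_nil hmem)]

theorem pvLo_append_new {l : List (Int × Int)} {p : Int × Int}
    (hnot : p.2 ∉ l.map (fun q => q.2)) : pvLo (l ++ [p]) p.2 = p.1 := by
  unfold pvLo
  rw [pvIdxs_append_pos rfl, pvIdxs_eq_nil hnot]
  rfl

theorem pvHi_append_new {l : List (Int × Int)} {p : Int × Int}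
    (hnot : p.2 ∉ l.map (fun q => q.2)) : pvHi (l ++ [p]) p.2 = p.1 := by
  unfold pvHi
  rw [pvIdxs_append_pos rfl, pvIdxs_eq_nil hnot]
  rfl

-- B's run scan: invariant over the remaining sorted tail
theorem pvBscan (u : List (Int × Int)) : ∀ (c : List (Int × Int)) (best lo hi prev : Int),
    c ≠ [] →
    (c ++ u).Pairwise (fun p q => p.2 ≤ q.2) →
    (∀ p ∈ c, p.2 ≤ prev) → prev ∈ c.map (fun p => p.2) →
    lo = pvLo c prev → hi = pvHi c prev →
    0 ≤ best →
    (best = 0 ∨ ∃ v ∈ c.map (fun p => p.2), v ≠ prev ∧ best = pvDiff c v) →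
    (∀ v ∈ c.map (fun p => p.2), v ≠ prev → pvDiff c v ≤ best) →
    pvIsAns (c ++ u)
      (max (u.foldl (fun (st : Int × Int × Int × Int) p =>
          if p.2 ≠ st.2.2.2 then (max st.1 (st.2.2.1 - st.2.1), p.1, p.1, p.2)
          else (st.1, min st.2.1 p.1, max st.2.2.1 p.1, st.2.2.2)) (best, lo, hi, prev)).1
        ((u.foldl (fun (st : Int × Int × Int × Int) p =>
          if p.2 ≠ st.2.2.2 then (max st.1 (st.2.2.1 - st.2.1), p.1, p.1, p.2)
          else (st.1, min st.2.1 p.1, max st.2.2.1 p.1, st.2.2.2)) (best, lo, hi, prev)).2.2.1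
         - (u.foldl (fun (st : Int × Int × Int × Int) p =>
          if p.2 ≠ st.2.2.2 then (max st.1 (st.2.2.1 - st.2.1), p.1, p.1, p.2)
          else (st.1, min st.2.1 p.1, max st.2.2.1 p.1, st.2.2.2)) (best, lo, hi, prev)).2.1)) := by
  induction u with
  | nil =>
    intro c best lo hi prev hcne hpw hle hprev hlo hhi hb0 hbform hbub
    simp only [List.foldl_nil, List.append_nil]
    have hdprev : pvDiff c prev = hi - lo := by
      unfold pvDiff
      rw [← hlo, ← hhi]
    refine ⟨?_, ?_, ?_⟩
    · exact le_trans (hdprev ▸ pvDiff_nonneg hprev) (le_max_right _ _)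
    · rcases max_choice best (hi - lo) with hmx | hmx <;> rw [hmx]
      · rcases hbform with rfl | ⟨v, hv, _, rfl⟩
        · exact Or.inl rfl
        · exact Or.inr ⟨v, hv, rfl⟩
      · exact Or.inr ⟨prev, hprev, hdprev.symm⟩
    · intro v hv
      by_cases hvp : v = prev
      · subst hvp
        exact hdprev ▸ le_max_right _ _
      · exact le_trans (hbub v hv hvp) (le_max_left _ _)
  | cons p t ih =>
    intro c best lo hi prev hcne hpw hle hprev hlo hhi hb0 hbform hbub
    have hassoc : c ++ p :: t = (c ++ [p]) ++ t := by simp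
    have hdprev : pvDiff c prev = hi - lo := by
      unfold pvDiff
      rw [← hlo, ← hhi]
    by_cases hq : p.2 = prev
    · -- p extends the current run
      rw [List.foldl_cons]
      have hstep : (if p.2 ≠ ((best, lo, hi, prev) : Int × Int × Int × Int).2.2.2 then
            (max (best, lo, hi, prev).1 ((best, lo, hi, prev).2.2.1 - (best, lo, hi, prev).2.1),
              p.1, p.1, p.2)
          else ((best, lo, hi, prev).1, min (best, lo, hi, prev).2.1 p.1,
              max (best, lo, hi, prev).2.2.1 p.1, (best, lo, hi, prev).2.2.2))
          = ((best, min lo p.1, max hi p.1, prev) : Int × Int × Int × Int) := by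
        simp [hq]
      rw [hstep, hassoc]
      refine ih (c ++ [p]) best (min lo p.1) (max hi p.1) prev (by simp)
        (by rw [← hassoc]; exact hpw) ?_ ?_ ?_ ?_ hb0 ?_ ?_
      · intro q hqm
        rcases List.mem_append.mp hqm with hqc | hqp
        · exact hle q hqc
        · simp only [List.mem_singleton] at hqp
          subst hqp
          exact le_of_eq hq
      · rw [List.map_append]
        exact List.mem_append_left _ hprev
      · rw [pvLo_append_pos hprev hq, hlo]
      · rw [pvHi_append_pos hprev hq, hhi]
      · rcases hbform with rfl | ⟨v, hv, hvne, rfl⟩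
        · exact Or.inl rfl
        · refine Or.inr ⟨v, ?_, hvne, ?_⟩
          · rw [List.map_append]
            exact List.mem_append_left _ hv
          · exact (pvDiff_append_neg (by rw [hq]; exact Ne.symm hvne)).symm
      · intro v hv hvne
        rw [List.map_append] at hv
        rcases List.mem_append.mp hv with hvc | hvp
        · rw [pvDiff_append_neg (by rw [hq]; exact Ne.symm hvne)]
          exact hbub v hvc hvne
        · exfalso
          have : v = prev := by
            have : v = p.2 := by simpa using hvp
            rw [this, hq]
          exact hvne this
    · -- p starts a new run
      have hppgt : ∀ q ∈ c, q.2 ≤ p.2 := by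
        intro q hqc
        exact (List.pairwise_append.mp hpw).2.2 q hqc p (by simp)
      have hprevle : prev ≤ p.2 := by
        simp only [List.mem_map] at hprev
        obtain ⟨q, hqc, hq2⟩ := hprev
        exact hq2 ▸ hppgt q hqc
      have hprev' : prev ∈ c.map (fun p => p.2) := by
        assumption
      have hpnotin : p.2 ∉ c.map (fun q => q.2) := by
        intro hmem
        simp only [List.mem_map] at hmem
        obtain ⟨q, hqc, hq2⟩ := hmem
        have h1 : p.2 ≤ prev := hq2 ▸ hle q hqc
        exact hq (le_antisymm h1 hprevle)
      rw [List.foldl_cons]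
      have hstep : (if p.2 ≠ ((best, lo, hi, prev) : Int × Int × Int × Int).2.2.2 then
            (max (best, lo, hi, prev).1 ((best, lo, hi, prev).2.2.1 - (best, lo, hi, prev).2.1),
              p.1, p.1, p.2)
          else ((best, lo, hi, prev).1, min (best, lo, hi, prev).2.1 p.1,
              max (best, lo, hi, prev).2.2.1 p.1, (best, lo, hi, prev).2.2.2))
          = ((max best (hi - lo), p.1, p.1, p.2) : Int × Int × Int × Int) := by
        simp [hq]
      rw [hstep, hassoc]
      refine ih (c ++ [p]) (max best (hi - lo)) p.1 p.1 p.2 (by simp)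
        (by rw [← hassoc]; exact hpw) ?_ ?_ ?_ ?_ ?_ ?_ ?_
      · intro q hqm
        rcases List.mem_append.mp hqm with hqc | hqp
        · exact hppgt q hqc
        · simp only [List.mem_singleton] at hqp
          subst hqp
          exact le_refl _
      · rw [List.map_append]
        exact List.mem_append_right _ (by simp)
      · exact (pvLo_append_new hpnotin).symm
      · exact (pvHi_append_new hpnotin).symm
      · exact le_trans hb0 (le_max_left _ _)
      · rcases max_choice best (hi - lo) with hmx | hmx <;> rw [hmx]
        · rcases hbform with rfl | ⟨v, hv, _, rfl⟩
          · exact Or.inl rfl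
          · refine Or.inr ⟨v, ?_, ?_, ?_⟩
            · rw [List.map_append]
              exact List.mem_append_left _ hv
            · intro h
              exact hpnotin (by rw [← h]; exact hv)
            · exact (pvDiff_append_neg (fun h => hpnotin (by rw [h]; exact hv))).symm
        · refine Or.inr ⟨prev, ?_, fun h => hq h.symm, ?_⟩
          · rw [List.map_append]
            exact List.mem_append_left _ hprev'
          · rw [pvDiff_append_neg hq]
            exact hdprev.symm
      · intro v hv hvne
        rw [List.map_append] at hv
        rcases List.mem_append.mp hv with hvc | hvp
        · rw [pvDiff_append_neg (fun h => hvne h.symm)]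
          by_cases hvprev : v = prev
          · subst hvprev
            rw [hdprev]
            exact le_max_right _ _
          · exact le_trans (hbub v hvc hvprev) (le_max_left _ _)
        · exact absurd (by simpa using hvp) hvne

-- the index comprehension is a map over the list itself
theorem pvDeltas (bell : List Int) :
    (PySem.List.pyRange 0 (bell.length : Int) 1).map
      (fun a => if PySem.List.pyGetD bell a 0 = 2 then (1 : Int) else -1)
    = bell.map (fun x => if x = 2 then (1 : Int) else -1) := by
  have h := PySem.List.map_pyGetD_pyRange_zero' (xs := bell) (d := (0 : Int))
  calc (PySem.List.pyRange 0 (bell.length : Int) 1).map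
        (fun a => if PySem.List.pyGetD bell a 0 = 2 then (1 : Int) else -1)
      = ((PySem.List.pyRange 0 (bell.length : Int) 1).map
          (fun a => PySem.List.pyGetD bell a 0)).map
          (fun x => if x = 2 then (1 : Int) else -1) := by
        rw [List.map_map]; rfl
    _ = bell.map (fun x => if x = 2 then (1 : Int) else -1) := by rw [h]

-- B's prefix-building loop is pyAccumulate
theorem pvPrefsB (xs : List Int) : ∀ (acc : List Int) (s : Int),
    (xs.foldl (fun (st : List Int × Int) x =>
      let v := st.2 + (if x = 2 then (1 : Int) else -1)
      (st.1 ++ [v], v)) (acc, s)).1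
    = acc ++ pyAccumulate (xs.map (fun x => if x = 2 then (1 : Int) else -1)) s := by
  induction xs with
  | nil => intro acc s; simp [pyAccumulate]
  | cons x t ih =>
    intro acc s
    simp only [List.foldl_cons, List.map_cons, pyAccumulate]
    rw [ih]
    simp

-- ===== VERDICT (by name: the statement is the Claim_ definition above) =====
theorem solution_spec : Claim_equal_solution := by
  unfold Claim_equal_solution Spec_solution
  intro bell _
  unfold solution solution_alt
  simp only [pvDeltas]
  rw [pvPrefsB]
  have hacc : pyAccumulate ((0 : Int) :: bell.map (fun x => if x = 2 then (1 : Int) else -1)) 0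
      = (0 : Int) :: pyAccumulate (bell.map (fun x => if x = 2 then (1 : Int) else -1)) 0 := by
    simp [pyAccumulate]
  rw [hacc]
  simp only [List.singleton_append]
  set P := (0 : Int) :: pyAccumulate (bell.map (fun x => if x = 2 then (1 : Int) else -1)) 0
    with hP
  have hPne : P ≠ [] := by simp [hP]
  have hne : PySem.List.enumerate P 0 ≠ [] := by
    rw [hP, PySem.List.enumerate_cons]
    simp
  have hpair : (PySem.List.enumerate P 0).Pairwise (fun p q => p.1 < q.1) :=
    PySem.List.pairwise_lt_enumerate P 0
  have hA := pvIsAns_A (ps := PySem.List.enumerate P 0) hne hpair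
  have hperm : (PySem.List.sorted (PySem.List.enumerate P 0) (fun p => p.2) false).Perm
      (PySem.List.enumerate P 0) := PySem.List.sorted_perm _ _ _
  have hpw : (PySem.List.sorted (PySem.List.enumerate P 0) (fun p => p.2) false).Pairwise
      (fun p q => p.2 ≤ q.2) := PySem.List.sorted_pairwise _ _
  cases horder : PySem.List.sorted (PySem.List.enumerate P 0) (fun p => p.2) false with
  | nil =>
    exfalso
    rw [PySem.List.sorted_eq_nil_iff] at horder
    exact hne horder
  | cons h t =>
    rw [horder] at hperm hpw
    have hB := pvBscan t [h] 0 h.1 h.1 h.2 (by simp) (by simpa using hpw)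
      (by simp) (by simp) (by simp [pvLo, pvIdxs, pvListMin]) (by simp [pvHi, pvIdxs, pvListMax])
      (le_refl 0) (Or.inl rfl)
      (by intro v hv hvne; exact absurd (by simpa using hv) hvne)
    rw [List.singleton_append] at hB
    have hBps := pvIsAns_perm hperm hB
    exact pvIsAns_unique hA hBps
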